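-- pv_equiv track=rewrite | github.com/brianescutia/ConnectN-Projects | connectn.py | horizontal_win
-- ===== SOURCE A (Python) =====
-- def num_of_rows(board):
--     return len(board)
--
-- def num_of_cols(board):
--     return len(board[0])
--
-- def horizontal_win(board, pieces):
--     if num_of_cols(board) < pieces:
--         return False
--     # for every row until the last row
--     for i in range(0, num_of_rows(board)):
--         # for every position in a given row until the last column
--         for j in range(0, num_of_cols(board)):
--             symbol = board[i][j]  # store the symbol
--             # if the symbol is equal to 0, that means no piece is at the given position; stop and check the next
--             if symbol == 0:
--                 continue
--             num_in_row = 1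
--             # for every position +1 of the given position until the last column
--             for k in range(j+1, num_of_cols(board)):
--                 if symbol == board[i][k]:
--                     num_in_row += 1
--                     if num_in_row == pieces:
--                         return True
--                     continue
--                 else:
--                     break
--     return False
-- ===== SOURCE B (Python) =====
-- def horizontal_win(board, pieces):
--     if not board or len(board[0]) < pieces:
--         return False
--     width = len(board[0])
--     for row in board:
--         prev, run = 0, 1
--         for cur in row[:width]:
--             if cur != 0 and cur == prev:
--                 run += 1
--                 if run == pieces:
--                     return True
--             else:
--                 run = 1
--             prev = cur
--     return False
-- ===== Notes on version B (the rewrite author's own statement) =====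
-- stated objective: alternative
-- what changed: Replaces A's restart-at-every-column rescan (for each start j, re-count the run from scratch) with a single run-length pass per row over the board's width, tracking (previous symbol, current run length).
import Mathlib
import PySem

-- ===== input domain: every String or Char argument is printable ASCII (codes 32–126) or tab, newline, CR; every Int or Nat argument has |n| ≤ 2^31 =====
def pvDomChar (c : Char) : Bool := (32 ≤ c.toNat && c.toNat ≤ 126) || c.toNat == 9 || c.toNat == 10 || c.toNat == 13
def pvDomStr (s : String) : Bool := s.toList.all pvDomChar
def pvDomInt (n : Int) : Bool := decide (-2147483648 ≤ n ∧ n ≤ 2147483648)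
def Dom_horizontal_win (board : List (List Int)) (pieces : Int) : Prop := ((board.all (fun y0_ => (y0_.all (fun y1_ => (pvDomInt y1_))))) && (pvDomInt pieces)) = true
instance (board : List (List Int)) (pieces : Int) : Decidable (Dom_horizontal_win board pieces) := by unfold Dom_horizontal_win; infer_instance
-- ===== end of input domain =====

-- B replaces A's restart-at-every-column rescan with a single run-length pass per row
-- tracking (previous symbol, current run length) (objective: alternative).


-- ===== PORT A =====
-- Under Pre_ every row has exactly num_of_cols(board) entries, so the index loops
-- 'for j in range(0, cols)' / 'for k in range(j+1, cols)' over board[i] are rendered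
-- as the obvious structural recursions over the row and its tails (same order, same state).

-- inner 'for k in range(j+1, cols)' loop: count symbols equal to `symbol`, return True at num_in_row == pieces, break on mismatch
def aChain (symbol pieces : Int) : Int → List Int → Bool
  | _, [] => false
  | numInRow, x :: xs =>
    if symbol = x then
      (if numInRow + 1 = pieces then true else aChain symbol pieces (numInRow + 1) xs)
    else false

-- middle 'for j in range(0, cols)' loop over starting positions (tails of the row)
def aRow (pieces : Int) : List Int → Bool
  | [] => false
  | x :: xs =>
    if x = 0 then aRow pieces xs
    else if aChain x pieces 1 xs then true else aRow pieces xs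

-- outer 'for i in range(0, num_of_rows(board))' loop
def aRows (pieces : Int) : List (List Int) → Bool
  | [] => false
  | r :: rs => if aRow pieces r then true else aRows pieces rs

def horizontal_win (board : List (List Int)) (pieces : Int) : Bool :=
  -- num_of_cols(board) = len(board[0]); board ≠ [] is guaranteed by Pre_.
  -- A's loops only inspect board[i][0..cols): under Pre_ (rows at least cols long)
  -- that is exactly `take cols` of each row.
  if ((board.headD []).length : Int) < pieces then false
  else aRows pieces (board.map (fun r => r.take (board.headD []).length))

-- ===== PORT B =====
-- inner loop of Source B: state (prev, run), reset run to 1 on break, win when run reaches pieces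
def altRow (pieces : Int) : Int → Int → List Int → Bool
  | _, _, [] => false
  | prev, run, cur :: rest =>
    if cur ≠ 0 ∧ cur = prev then
      (if run + 1 = pieces then true else altRow pieces cur (run + 1) rest)
    else altRow pieces cur 1 rest

def horizontal_win_alt (board : List (List Int)) (pieces : Int) : Bool :=
  if board.isEmpty then false
  else if ((board.headD []).length : Int) < pieces then false
  else board.any (fun row => altRow pieces 0 1 (row.take (board.headD []).length))

-- ===== PRECONDITION & SPEC =====
-- Pre_ excludes the inputs on which A raises IndexError: the empty board (len(board[0]))
-- and, unless the width guard already returns False, boards with a row shorter than the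
-- first row (A indexes every row up to len(board[0])).
def Pre_horizontal_win (board : List (List Int)) (pieces : Int) : Prop :=
  board ≠ [] ∧ (((board.headD []).length : Int) < pieces ∨ ∀ r ∈ board, (board.headD []).length ≤ r.length)
instance (board : List (List Int)) (pieces : Int) : Decidable (Pre_horizontal_win board pieces) := by
  unfold Pre_horizontal_win; infer_instance
def pvWitness_horizontal_win : List (List Int) × Int := ([[1, 1, 0], [0, 2, 2, 1]], 2)

def Spec_horizontal_win (board : List (List Int)) (pieces : Int) (out : Bool) : Prop := out = horizontal_win_alt board pieces
instance (board : List (List Int)) (pieces : Int) (out : Bool) : Decidable (Spec_horizontal_win board pieces out) := by unfold Spec_horizontal_win; infer_instance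

-- ===== CLAIM (what is proved, stated in full; the proofs are below) =====
def Claim_equal_horizontal_win : Prop := ∀ (board : List (List Int)) (pieces : Int), Dom_horizontal_win board pieces → Pre_horizontal_win board pieces → Spec_horizontal_win board pieces (horizontal_win board pieces)

-- ===== LEMMAS AND PROOFS =====

-- length of the maximal prefix of xs whose elements all equal s
def cnt (s : Int) : List Int → Nat
  | [] => 0
  | x :: xs => if x = s then cnt s xs + 1 else 0

-- A's inner loop succeeds exactly when the run still short of `pieces` can be completed
-- by the equal-prefix of the remaining list.
theorem aChain_eq (symbol pieces : Int) : ∀ (xs : List Int) (n : Int),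
    aChain symbol pieces n xs = decide (n < pieces ∧ pieces ≤ n + (cnt symbol xs : Int)) := by
  intro xs
  induction xs with
  | nil =>
    intro n
    simp [aChain, cnt]
  | cons x xs ih =>
    intro n
    by_cases hx : symbol = x
    · have hcnt : cnt symbol (x :: xs) = cnt symbol xs + 1 := by simp [cnt, hx.symm]
      simp only [aChain]
      rw [if_pos hx, hcnt]
      by_cases hp : n + 1 = pieces
      · rw [if_pos hp]
        symm
        rw [decide_eq_true_eq]
        push_cast
        omega
      · rw [if_neg hp, ih, decide_eq_decide]
        push_cast
        omega
    · have hcnt : cnt symbol (x :: xs) = 0 := by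
        simp only [cnt]
        rw [if_neg (fun h : x = symbol => hx h.symm)]
      simp only [aChain]
      rw [if_neg hx, hcnt]
      symm
      rw [decide_eq_false_iff_not]
      push_cast
      omega

theorem aRow_cons_ne (pieces x : Int) (xs : List Int) (hx : x ≠ 0) :
    aRow pieces (x :: xs) = (aChain x pieces 1 xs || aRow pieces xs) := by
  simp only [aRow]
  rw [if_neg hx]
  by_cases h : aChain x pieces 1 xs = true <;> simp [h]

-- KEY invariant: the run-length scan with entry state (prev = p, run = n) returns true
-- exactly when the entry run completes to `pieces`, or A's restart scan succeeds on the rest.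
theorem altRow_eq (pieces : Int) : ∀ (xs : List Int) (p n : Int),
    1 ≤ n → (pieces ≤ 1 ∨ n < pieces) →
    altRow pieces p n xs =
      (decide (p ≠ 0 ∧ n < pieces ∧ pieces ≤ n + (cnt p xs : Int)) || aRow pieces xs) := by
  intro xs
  induction xs with
  | nil =>
    intro p n _ _
    simp [altRow, aRow, cnt]
  | cons x xs ih =>
    intro p n hn hinv
    by_cases hc : x ≠ 0 ∧ x = p
    · obtain ⟨hx0, hxp⟩ := hc
      subst hxp
      have hcnt : cnt x (x :: xs) = cnt x xs + 1 := by simp [cnt]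
      simp only [altRow]
      rw [if_pos (⟨hx0, trivial⟩ : x ≠ 0 ∧ True)]
      by_cases hp : n + 1 = pieces
      · rw [if_pos hp]
        symm
        rw [Bool.or_eq_true, decide_eq_true_eq]
        left
        refine ⟨hx0, by omega, ?_⟩
        rw [hcnt]; push_cast; omega
      · rw [if_neg hp, ih x (n + 1) (by omega) (by omega),
            aRow_cons_ne pieces x xs hx0, aChain_eq, ← Bool.or_assoc, ← Bool.decide_or]
        congr 1
        rw [decide_eq_decide, hcnt]
        simp only [ne_eq, hx0, not_false_eq_true, true_and]
        push_cast
        omega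
    · have hfalse : ¬ (p ≠ 0 ∧ n < pieces ∧ pieces ≤ n + (cnt p (x :: xs) : Int)) := by
        by_cases hxp : x = p
        · have hx0 : x = 0 := by by_contra h; exact hc ⟨h, hxp⟩
          intro h
          exact h.1 (hxp ▸ hx0)
        · have hcnt0 : cnt p (x :: xs) = 0 := by
            simp only [cnt]
            rw [if_neg hxp]
          intro h
          rw [hcnt0] at h
          obtain ⟨_, h1, h2⟩ := h
          push_cast at h2
          omega
      simp only [altRow]
      rw [if_neg hc, ih x 1 (by omega) (by omega)]
      by_cases hx0 : x = 0
      · subst hx0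
        have hrw : aRow pieces ((0 : Int) :: xs) = aRow pieces xs := by
          simp [aRow]
        rw [hrw]
        simp [hfalse]
      · rw [aRow_cons_ne pieces x xs hx0, aChain_eq]
        have hd : (decide (x ≠ 0 ∧ 1 < pieces ∧ pieces ≤ 1 + (cnt x xs : Int)) : Bool)
            = decide ((1 : Int) < pieces ∧ pieces ≤ 1 + (cnt x xs : Int)) := by
          simp [hx0]
        rw [hd]
        simp [hfalse]

-- at the entry state (prev = 0, run = 1) the first disjunct is vacuous
theorem altRow_entry (pieces : Int) (row : List Int) :
    altRow pieces 0 1 row = aRow pieces row := by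
  rw [altRow_eq pieces row 0 1 (by omega) (by omega)]
  simp

theorem aRows_eq_any (pieces : Int) : ∀ (rs : List (List Int)),
    aRows pieces rs = rs.any (fun row => aRow pieces row) := by
  intro rs
  induction rs with
  | nil => simp [aRows]
  | cons r rs ih =>
    simp only [aRows, List.any_cons]
    by_cases h : aRow pieces r = true <;> simp [h, ih]

-- ===== VERDICT (by name: the statement is the Claim_ definition above) =====
theorem horizontal_win_spec : Claim_equal_horizontal_win := by
  intro board pieces _ hpre
  unfold Spec_horizontal_win horizontal_win horizontal_win_alt
  obtain ⟨hne, -⟩ := hpre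
  have hempty : board.isEmpty = false := by
    cases board with
    | nil => exact absurd rfl hne
    | cons r rs => rfl
  rw [hempty, if_neg Bool.false_ne_true]
  by_cases hg : ((board.headD []).length : Int) < pieces
  · rw [if_pos hg, if_pos hg]
  · rw [if_neg hg, if_neg hg, aRows_eq_any, List.any_map]
    exact congrArg board.any
      (funext fun row => (altRow_entry pieces (row.take (board.headD []).length)).symm)
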